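-- pv_equiv track=rewrite | github.com/DMB3/advent-of-code | python/2023/003/part_two.py | find_to_the_right
-- ===== SOURCE A (Python) =====
-- def find_to_the_right(line, column):
--     digits = ""
--
--     c = column + 1
--     while c < len(line):
--         character = line[c]
--
--         if character.isdigit():
--             digits += character
--         else:
--             break
--
--         c += 1
--
--     return digits, c - 1
-- ===== SOURCE B (Python) =====
-- import re
--
--
-- def find_to_the_right(line, column):
--     rest = line[column + 1:]
--     digits = re.match(r"[0-9]*", rest).group()
--     return digits, column + len(digits)
-- ===== Notes on version B (the rewrite author's own statement) =====
-- stated objective: idiomatic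
-- what changed: The manual index-incrementing while loop is replaced by slicing off line[column+1:] and taking the anchored regex match of a digit run, with the end index recovered arithmetically as column + len(digits).
-- outside the precondition, e.g. on find_to_the_right('12', -3): A returns ('1212', 1), B returns ('12', -1); on find_to_the_right('ab', -10): A raises IndexError, B returns ('', -10)
import Mathlib
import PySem

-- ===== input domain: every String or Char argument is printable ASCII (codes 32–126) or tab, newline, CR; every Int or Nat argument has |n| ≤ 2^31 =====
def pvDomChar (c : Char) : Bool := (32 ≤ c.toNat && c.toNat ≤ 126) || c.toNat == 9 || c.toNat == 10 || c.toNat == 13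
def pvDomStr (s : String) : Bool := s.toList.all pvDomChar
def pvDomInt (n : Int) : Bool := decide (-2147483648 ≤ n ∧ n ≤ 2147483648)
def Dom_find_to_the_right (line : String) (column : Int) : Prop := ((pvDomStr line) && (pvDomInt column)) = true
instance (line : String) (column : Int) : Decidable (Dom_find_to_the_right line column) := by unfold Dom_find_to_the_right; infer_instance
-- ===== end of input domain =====

-- B replaces A's manual index-incrementing while loop by a slice of line[column+1:] plus an
-- anchored digit-run match (regex in Python, takeWhile in the port), recovering the end index
-- arithmetically; objective: more idiomatic, no speed claim.


-- ===== PORT A =====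
-- A's while loop: c walks right from column+1, appending digit characters to `digits`,
-- stopping at the first non-digit or the end of the string; returns (digits, c - 1).
def ftrLoop (cs : List Char) (digits : List Char) (c : Int) : List Char × Int :=
  if _h : c < (cs.length : Int) then
    match PySem.List.pyGet? cs c with
    | some ch =>
      if PySem.Chars.isdigit ch then ftrLoop cs (digits ++ [ch]) (c + 1)
      else (digits, c - 1)
    | none => (digits, c - 1)   -- Python raises IndexError here (c < -len(line)); outside Pre_
  else (digits, c - 1)
termination_by ((cs.length : Int) - c).toNat
decreasing_by omega

def find_to_the_right (line : String) (column : Int) : String × Int :=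
  let r := ftrLoop line.toList [] (column + 1)
  (String.ofList r.1, r.2)

-- ===== PORT B =====
-- Source B: rest = line[column+1:]; digits = re.match(r"[0-9]*", rest).group()  (the anchored
-- match of [0-9]* is exactly the longest digit prefix of rest, ported as takeWhile isdigit);
-- return digits, column + len(digits).
def find_to_the_right_alt (line : String) (column : Int) : String × Int :=
  let rest := PySem.List.slice line.toList (some (column + 1)) none
  let digits := rest.takeWhile PySem.Chars.isdigit
  (String.ofList digits, column + digits.length)

-- ===== PRECONDITION & SPEC =====
-- Pre_ excludes column < -1: there A's line[c] uses Python's negative indexing, which either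
-- raises IndexError (c < -len) or wraps to the end of the string and can even re-read the
-- front of it once c passes 0 — an accident of A's index arithmetic; B slices instead.
def Pre_find_to_the_right (_line : String) (column : Int) : Prop := -1 ≤ column
instance (line : String) (column : Int) : Decidable (Pre_find_to_the_right line column) := by unfold Pre_find_to_the_right; infer_instance

def pvWitness_find_to_the_right : String × Int := ("a12b", 1)

def Spec_find_to_the_right (line : String) (column : Int) (out : String × Int) : Prop := out = find_to_the_right_alt line column
instance (line : String) (column : Int) (out : String × Int) : Decidable (Spec_find_to_the_right line column out) := by unfold Spec_find_to_the_right; infer_instance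

-- ===== CLAIM (what is proved, stated in full; the proofs are below) =====
def Claim_equal_find_to_the_right : Prop := ∀ (line : String) (column : Int), Dom_find_to_the_right line column → Pre_find_to_the_right line column → Spec_find_to_the_right line column (find_to_the_right line column)

-- ===== LEMMAS AND PROOFS =====

-- A's loop, started at a nonnegative index c, appends the digit prefix of cs.drop c.toNat
-- to the accumulator and ends with final index (c + number of digits consumed) - 1.
lemma ftrLoop_eq (cs acc : List Char) (c : Int) : 0 ≤ c →
    ftrLoop cs acc c =
      (acc ++ (cs.drop c.toNat).takeWhile PySem.Chars.isdigit,
       c + ((cs.drop c.toNat).takeWhile PySem.Chars.isdigit).length - 1) := by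
  induction acc, c using ftrLoop.induct cs with
  | case1 acc c h ch hget hdig ih =>
    intro hc
    have hcl : c.toNat < cs.length := by omega
    have hch : ch = cs[c.toNat] := by
      simp only [PySem.List.pyGet?, PySem.List.pyIdx?, if_pos hc, if_pos h, Option.bind_some,
        List.getElem?_eq_getElem hcl] at hget
      exact (Option.some_inj.mp hget).symm
    have hdrop : cs.drop c.toNat = cs[c.toNat] :: cs.drop (c.toNat + 1) :=
      List.drop_eq_getElem_cons hcl
    have ht : (c + 1).toNat = c.toNat + 1 := by omega
    rw [ftrLoop]
    simp only [dif_pos h, hget, if_pos hdig]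
    rw [ih (by omega), hdrop, ht]
    simp [← hch, hdig]
    omega
  | case2 acc c h ch hget hdig =>
    intro hc
    have hcl : c.toNat < cs.length := by omega
    have hch : ch = cs[c.toNat] := by
      simp only [PySem.List.pyGet?, PySem.List.pyIdx?, if_pos hc, if_pos h, Option.bind_some,
        List.getElem?_eq_getElem hcl] at hget
      exact (Option.some_inj.mp hget).symm
    have hdrop : cs.drop c.toNat = cs[c.toNat] :: cs.drop (c.toNat + 1) :=
      List.drop_eq_getElem_cons hcl
    rw [ftrLoop]
    simp only [dif_pos h, hget, if_neg hdig]
    rw [hdrop]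
    simp [← hch, hdig]
  | case3 acc c h hget =>
    intro hc
    exfalso
    have hcl : c.toNat < cs.length := by omega
    simp only [PySem.List.pyGet?, PySem.List.pyIdx?, if_pos hc, if_pos h, Option.bind_some,
      List.getElem?_eq_getElem hcl] at hget
    exact Option.some_ne_none _ hget
  | case4 acc c h =>
    intro hc
    have hdrop : cs.drop c.toNat = [] := List.drop_eq_nil_of_le (by omega)
    rw [ftrLoop]
    simp [dif_neg h, hdrop]

-- ===== VERDICT (by name: the statement is the Claim_ definition above) =====
theorem find_to_the_right_spec : Claim_equal_find_to_the_right := by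
  intro line column _dom hpre
  have h1 : (0 : Int) ≤ column + 1 := by
    have : (-1 : Int) ≤ column := hpre
    omega
  unfold Spec_find_to_the_right find_to_the_right find_to_the_right_alt
  rw [ftrLoop_eq line.toList [] (column + 1) h1, PySem.List.slice_from _ h1]
  simp
  omega
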